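-- pv_equiv track=rewrite | github.com/Simplified-Shanto/ROS-Projects | ros2_ws_lane_lab/src/path_planning/path_planning/centerline.py | _keep_longest_run
-- ===== SOURCE A (Python) =====
-- from typing import List, Optional, Sequence, Tuple
--
-- Point = Tuple[int, int]
--
-- def _keep_longest_run(points: Sequence[Point], max_gap: int) -> List[Point]:
--     if len(points) <= 2:
--         return list(points)
--     runs = []
--     start = 0
--     for i in range(1, len(points)):
--         if (points[i][1] - points[i - 1][1]) > max_gap:
--             runs.append((start, i))
--             start = i
--     runs.append((start, len(points)))
--     best = max(runs, key=lambda r: r[1] - r[0])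
--     return list(points[best[0]:best[1]])
-- ===== SOURCE B (Python) =====
-- def _keep_longest_run(points, max_gap):
--     rest = list(points)
--     if len(rest) <= 2:
--         return rest
--     best = []
--     while rest:
--         j = 1
--         while j < len(rest) and rest[j][1] - rest[j - 1][1] <= max_gap:
--             j += 1
--         run, rest = rest[:j], rest[j:]
--         if len(run) > len(best):
--             best = run
--     return best
-- ===== Notes on version B (the rewrite author's own statement) =====
-- stated objective: alternative
-- what changed: B abandons A's index bookkeeping (one indexed pass building (start,end) pairs plus a max pass and a final slice): it repeatedly bites the leading gap-free run off the front of the sequence with a nested scan-and-split loop over suffixes, keeping the longest run list itself, so no index pairs, no max(), no slicing of the original.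
import Mathlib
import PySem

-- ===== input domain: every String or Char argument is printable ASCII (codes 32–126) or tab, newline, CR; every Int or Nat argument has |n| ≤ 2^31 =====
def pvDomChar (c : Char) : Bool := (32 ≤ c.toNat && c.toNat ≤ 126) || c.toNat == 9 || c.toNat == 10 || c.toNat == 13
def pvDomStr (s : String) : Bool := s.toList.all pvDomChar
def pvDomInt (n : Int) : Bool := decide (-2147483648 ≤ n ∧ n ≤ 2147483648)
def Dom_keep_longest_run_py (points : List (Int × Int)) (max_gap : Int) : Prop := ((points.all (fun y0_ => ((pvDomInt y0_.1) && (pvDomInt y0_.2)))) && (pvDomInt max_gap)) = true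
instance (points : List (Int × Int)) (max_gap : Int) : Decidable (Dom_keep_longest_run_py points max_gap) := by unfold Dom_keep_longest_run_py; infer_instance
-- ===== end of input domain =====

-- B replaces A's index bookkeeping (one indexed pass building (start,end) pairs, a max() pass, a
-- final slice) by repeatedly splitting the leading gap-free run off the front of the sequence and
-- keeping the longest run list itself; same return value by the equivalence proved below.

-- ===== PORT A =====
def keep_longest_run_py (points : List (Int × Int)) (max_gap : Int) : List (Int × Int) :=
  if points.length ≤ 2 then points
  else
    let st := (PySem.List.pyRange 1 (points.length : Int) 1).foldl
      (fun (s : List (Int × Int) × Int) i =>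
        if (PySem.List.pyGetD points i (0, 0)).2 - (PySem.List.pyGetD points (i - 1) (0, 0)).2 > max_gap
        then (s.1 ++ [(s.2, i)], i) else s)
      ([], 0)
    let runs := st.1 ++ [(st.2, (points.length : Int))]
    let best := (PySem.List.max? runs (fun r => r.2 - r.1)).getD (0, 0)
    PySem.List.slice points (some best.1) (some best.2)

-- ===== PORT B =====
-- inner loop "while j < len(rest) and rest[j][1] - rest[j-1][1] <= max_gap: j += 1" (j starts at 1):
-- altChain counts its steps by walking the successors of the head; exact, since the j-th Python
-- comparison reads rest[j] (current element) and rest[j-1] (its predecessor).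
def altChain (max_gap : Int) (prev : Int) : List (Int × Int) → Nat
  | [] => 0
  | q :: t => if q.2 - prev ≤ max_gap then 1 + altChain max_gap q.2 t else 0

-- outer loop "while rest:" — run, rest = rest[:j], rest[j:]; keep the longer run (strict >)
def altLoop (max_gap : Int) (best : List (Int × Int)) : List (Int × Int) → List (Int × Int)
  | [] => best
  | p :: t =>
    let j := 1 + altChain max_gap p.2 t
    let run := (p :: t).take j
    let rest := (p :: t).drop j
    altLoop max_gap (if run.length > best.length then run else best) rest
termination_by l => l.length
decreasing_by simp

def keep_longest_run_py_alt (points : List (Int × Int)) (max_gap : Int) : List (Int × Int) :=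
  if points.length ≤ 2 then points
  else altLoop max_gap [] points

-- ===== PRECONDITION & SPEC =====
def Spec_keep_longest_run_py (points : List (Int × Int)) (max_gap : Int) (out : List (Int × Int)) : Prop := out = keep_longest_run_py_alt points max_gap
instance (points : List (Int × Int)) (max_gap : Int) (out : List (Int × Int)) : Decidable (Spec_keep_longest_run_py points max_gap out) := by unfold Spec_keep_longest_run_py; infer_instance

-- ===== CLAIM (what is proved, stated in full; the proofs are below) =====
def Claim_equal_keep_longest_run_py : Prop := ∀ (points : List (Int × Int)) (max_gap : Int), Dom_keep_longest_run_py points max_gap → Spec_keep_longest_run_py points max_gap (keep_longest_run_py points max_gap)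

-- ===== LEMMAS AND PROOFS =====

lemma pyGetD_drop (xs : List (Int × Int)) (k : Nat) (i : Int) (h : 0 ≤ i) (d : Int × Int) :
    PySem.List.pyGetD (xs.drop k) i d = PySem.List.pyGetD xs (i + k) d := by
  obtain ⟨m, rfl⟩ : ∃ m : Nat, i = (m : Int) := ⟨i.toNat, (Int.toNat_of_nonneg h).symm⟩
  rw [show ((m : Int) + k) = ((m + k : Nat) : Int) by push_cast; ring]
  rw [PySem.List.pyGetD_natCast, PySem.List.pyGetD_natCast]
  simp [List.getD, List.getElem?_drop, Nat.add_comm]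

def gapAt (max_gap : Int) (P : List (Int × Int)) (i : Int) : Prop :=
  (PySem.List.pyGetD P i (0, 0)).2 - (PySem.List.pyGetD P (i - 1) (0, 0)).2 > max_gap


lemma gap_drop (mg : Int) (P : List (Int × Int)) (k : Nat) (i : Int) (h : 1 ≤ i) :
    gapAt mg (P.drop k) i ↔ gapAt mg P (i + k) := by
  unfold gapAt
  rw [pyGetD_drop P k i (by omega), pyGetD_drop P k (i - 1) (by omega),
      show i - 1 + k = i + k - 1 by ring]

lemma gap_cons (mg : Int) (p : Int × Int) (t : List (Int × Int)) (i : Int) (h : 1 ≤ i) :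
    gapAt mg t i ↔ gapAt mg (p :: t) (i + 1) := by
  have := gap_drop mg (p :: t) 1 i h
  simpa using this

lemma gap_one (mg : Int) (p q : Int × Int) (t : List (Int × Int)) :
    gapAt mg (p :: q :: t) 1 ↔ q.2 - p.2 > mg := by
  unfold gapAt
  norm_num [PySem.List.pyGetD_zero_cons]
  rw [show (1 : Int) = ((1 : Nat) : Int) by norm_num, PySem.List.pyGetD_natCast]
  simp [List.getD]

lemma altChain_le (mg prev : Int) (t : List (Int × Int)) : altChain mg prev t ≤ t.length := by
  induction t generalizing prev with
  | nil => simp [altChain]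
  | cons q t ih =>
    simp only [altChain]
    split
    · have := ih q.2; simp; omega
    · simp

lemma chain_no_cut (mg : Int) : ∀ (t : List (Int × Int)) (p : Int × Int) (i : Int),
    1 ≤ i → i ≤ (altChain mg p.2 t : Int) → ¬ gapAt mg (p :: t) i := by
  intro t
  induction t with
  | nil => intro p i h1 h2; simp [altChain] at h2; omega
  | cons q t ih =>
    intro p i h1 h2
    simp only [altChain] at h2
    split at h2
    · rename_i hle
      by_cases hi : i = 1
      · subst hi
        rw [gap_one]
        omega
      · have h1' : 1 ≤ i - 1 := by omega
        have := ih q (i - 1) h1' (by push_cast at h2 ⊢; omega)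
        rw [gap_cons mg p (q :: t) (i - 1) h1'] at this
        simpa using this
    · norm_num at h2; omega

lemma chain_cut (mg : Int) : ∀ (t : List (Int × Int)) (p : Int × Int),
    altChain mg p.2 t < t.length → gapAt mg (p :: t) (1 + (altChain mg p.2 t : Int)) := by
  intro t
  induction t with
  | nil => intro p h; simp at h
  | cons q t ih =>
    intro p h
    simp only [altChain] at h ⊢
    split
    · rename_i hle
      rw [if_pos hle] at h
      have h' : altChain mg q.2 t < t.length := by simp at h; omega
      have := ih q h'
      rw [gap_cons mg p (q :: t) _ (by omega)] at this
      convert this using 1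
      push_cast; ring
    · rename_i hgt
      rw [if_neg hgt] at h
      norm_num
      rw [gap_one]
      omega

def shiftRun (j : Int) (r : Int × Int) : Int × Int := (r.1 + j, r.2 + j)

lemma fold_nocut (g : Int → Prop) [DecidablePred g] (L : List Int) (h : ∀ i ∈ L, ¬ g i) :
    ∀ s : List (Int × Int) × Int,
    L.foldl (fun (s : List (Int × Int) × Int) i => if g i then (s.1 ++ [(s.2, i)], i) else s) s = s := by
  induction L with
  | nil => intro s; rfl
  | cons i L ih =>
    intro s
    simp only [List.foldl_cons, if_neg (h i List.mem_cons_self)]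
    exact ih (fun x hx => h x (List.mem_cons_of_mem _ hx)) s

lemma fold_shift (g g' : Int → Prop) [DecidablePred g] [DecidablePred g'] (j : Int)
    (L : List Int) (hL : ∀ i ∈ L, (g (i + j) ↔ g' i)) :
    ∀ (rs : List (Int × Int)) (st : Int),
    (L.map (· + j)).foldl (fun (s : List (Int × Int) × Int) i => if g i then (s.1 ++ [(s.2, i)], i) else s) (rs.map (shiftRun j), st + j)
      = ((L.foldl (fun (s : List (Int × Int) × Int) i => if g' i then (s.1 ++ [(s.2, i)], i) else s) (rs, st)).1.map (shiftRun j),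
         (L.foldl (fun (s : List (Int × Int) × Int) i => if g' i then (s.1 ++ [(s.2, i)], i) else s) (rs, st)).2 + j) := by
  induction L with
  | nil => intro rs st; simp
  | cons i L ih =>
    intro rs st
    have hgi := hL i List.mem_cons_self
    have ih' := ih (fun x hx => hL x (List.mem_cons_of_mem _ hx))
    by_cases h : g' i
    · simp only [List.map_cons, List.foldl_cons, if_pos h, if_pos (hgi.mpr h)]
      have : (rs.map (shiftRun j) ++ [(st + j, i + j)]) = (rs ++ [(st, i)]).map (shiftRun j) := by
        simp [shiftRun]
      rw [this]
      exact ih' (rs ++ [(st, i)]) i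
    · simp only [List.map_cons, List.foldl_cons, if_neg h, if_neg (fun hc => h (hgi.mp hc))]
      exact ih' rs st

lemma pyRange_shift (j n : Int) :
    PySem.List.pyRange (j + 1) n 1 = (PySem.List.pyRange 1 (n - j) 1).map (· + j) := by
  rw [PySem.List.pyRange_one, PySem.List.pyRange_one, List.map_map]
  have : (n - (j + 1)).toNat = (n - j - 1).toNat := by omega
  rw [this]
  apply List.map_congr_left
  intro k _
  simp
  ring

def runsA (max_gap : Int) (P : List (Int × Int)) : List (Int × Int) :=
  let st := (PySem.List.pyRange 1 (P.length : Int) 1).foldl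
    (fun (s : List (Int × Int) × Int) i =>
      if (PySem.List.pyGetD P i (0, 0)).2 - (PySem.List.pyGetD P (i - 1) (0, 0)).2 > max_gap
      then (s.1 ++ [(s.2, i)], i) else s)
    ([], 0)
  st.1 ++ [(st.2, (P.length : Int))]

lemma fA_accum (g : Int → Prop) [DecidablePred g] (L : List Int) :
    ∀ (runs : List (Int × Int)) (start : Int),
    L.foldl (fun (s : List (Int × Int) × Int) i => if g i then (s.1 ++ [(s.2, i)], i) else s) (runs, start)
      = (runs ++ (L.foldl (fun (s : List (Int × Int) × Int) i => if g i then (s.1 ++ [(s.2, i)], i) else s) ([], start)).1,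
         (L.foldl (fun (s : List (Int × Int) × Int) i => if g i then (s.1 ++ [(s.2, i)], i) else s) ([], start)).2) := by
  induction L with
  | nil => intro runs start; simp
  | cons i L ih =>
    intro runs start
    by_cases h : g i
    · simp only [List.foldl_cons, if_pos h, List.nil_append]
      rw [ih (runs ++ [(start, i)]) i, ih [(start, i)] i]
      simp
    · simp only [List.foldl_cons, if_neg h]
      exact ih runs start

lemma runsA_nil_cut (mg : Int) (p : Int × Int) (t : List (Int × Int))
    (hc : altChain mg p.2 t = t.length) :
    runsA mg (p :: t) = [(0, ((p :: t).length : Int))] := by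
  have h : ∀ i ∈ PySem.List.pyRange 1 (((p :: t).length : Int)) 1,
      ¬ ((PySem.List.pyGetD (p :: t) i (0, 0)).2 - (PySem.List.pyGetD (p :: t) (i - 1) (0, 0)).2 > mg) := by
    intro i hi
    rw [PySem.List.mem_pyRange_one] at hi
    exact chain_no_cut mg t p i hi.1 (by simp at hi; omega)
  unfold runsA
  rw [fold_nocut _ _ h]
  rfl

lemma runsA_cut (mg : Int) (p : Int × Int) (t : List (Int × Int))
    (hc : altChain mg p.2 t < t.length) :
    runsA mg (p :: t) = (0, ((1 + altChain mg p.2 t : Nat) : Int))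
      :: (runsA mg ((p :: t).drop (1 + altChain mg p.2 t))).map (shiftRun ((1 + altChain mg p.2 t : Nat) : Int)) := by
  set c := altChain mg p.2 t with hc'
  set P := p :: t with hP
  set g : Int → Prop := fun i => (PySem.List.pyGetD P i (0, 0)).2 - (PySem.List.pyGetD P (i - 1) (0, 0)).2 > mg with hg
  set P' := P.drop (1 + c) with hP'
  set g' : Int → Prop := fun i => (PySem.List.pyGetD P' i (0, 0)).2 - (PySem.List.pyGetD P' (i - 1) (0, 0)).2 > mg with hg'
  have hn : P.length = t.length + 1 := by simp [hP]
  have hlen' : P'.length = t.length - c := by simp [hP', hP]; omega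
  have hnz : (P'.length : Int) = (P.length : Int) - ((1 + c : Nat) : Int) := by
    rw [hlen', hn]; push_cast; omega
  -- split the range
  have hsplit : PySem.List.pyRange 1 (P.length : Int) 1
      = PySem.List.pyRange 1 ((1 + c : Nat) : Int) 1 ++ (((1 + c : Nat) : Int) :: PySem.List.pyRange (((1 + c : Nat) : Int) + 1) (P.length : Int) 1) := by
    have hsB : PySem.List.pyRange ((1 + c : Nat) : Int) (P.length : Int) 1
        = ((1 + c : Nat) : Int) :: PySem.List.pyRange (((1 + c : Nat) : Int) + 1) (P.length : Int) 1 :=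
      PySem.List.pyRange_one_cons (by rw [hn]; push_cast; omega)
    rw [PySem.List.pyRange_one_append 1 ((1 + c : Nat) : Int) (P.length : Int) (by push_cast; omega) (by rw [hn]; push_cast; omega), hsB]
  unfold runsA
  rw [hsplit, List.foldl_append, List.foldl_cons]
  rw [fold_nocut g (PySem.List.pyRange 1 ((1 + c : Nat) : Int) 1) (by
    intro i hi
    rw [PySem.List.mem_pyRange_one] at hi
    exact chain_no_cut mg t p i hi.1 (by push_cast at hi; omega))]
  have hcut : g ((1 + c : Nat) : Int) := by
    have := chain_cut mg t p hc
    rw [hg]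
    convert this using 2
  rw [if_pos hcut]
  simp only [List.nil_append]
  rw [fA_accum g (PySem.List.pyRange (((1 + c : Nat) : Int) + 1) (P.length : Int) 1)]
  rw [pyRange_shift ((1 + c : Nat) : Int) (P.length : Int)]
  have hshift := fold_shift g g' ((1 + c : Nat) : Int)
      (PySem.List.pyRange 1 ((P.length : Int) - ((1 + c : Nat) : Int)) 1)
      (by
        intro i hi
        rw [PySem.List.mem_pyRange_one] at hi
        exact (gap_drop mg P (1 + c) i hi.1).symm)
      [] 0
  simp only [List.map_nil, Int.zero_add] at hshift
  rw [hshift]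
  rw [← hnz]
  have hback : ((P'.length : Int) + ((1 + c : Nat) : Int)) = (P.length : Int) := by omega
  simp only [List.map_append, List.map_cons, List.map_nil, List.cons_append, List.nil_append,
    shiftRun, hback]
  rfl


def splitRuns (max_gap : Int) : List (Int × Int) → List (List (Int × Int))
  | [] => []
  | p :: t =>
    let j := 1 + altChain max_gap p.2 t
    (p :: t).take j :: splitRuns max_gap ((p :: t).drop j)
termination_by l => l.length
decreasing_by simp

lemma runsA_nonneg (mg : Int) : ∀ (N : Nat) (P : List (Int × Int)), P.length ≤ N → P ≠ [] →
    ∀ r ∈ runsA mg P, 0 ≤ r.1 ∧ 0 ≤ r.2 := by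
  intro N
  induction N with
  | zero => intro P hP hne; simp [List.length_eq_zero_iff.mp (Nat.le_zero.mp hP)] at hne
  | succ N ih =>
    intro P hP hne r hr
    obtain ⟨p, t, rfl⟩ := List.exists_cons_of_ne_nil hne
    by_cases hc : altChain mg p.2 t = t.length
    · rw [runsA_nil_cut mg p t hc] at hr
      simp at hr
      simp [hr]
      positivity
    · have hc' : altChain mg p.2 t < t.length :=
        lt_of_le_of_ne (altChain_le mg p.2 t) hc
      rw [runsA_cut mg p t hc'] at hr
      rcases List.mem_cons.mp hr with h | h
      · simp [h]
        positivity
      · obtain ⟨r', hr', rfl⟩ := List.mem_map.mp h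
        have hdne : (p :: t).drop (1 + altChain mg p.2 t) ≠ [] := by
          simp; omega
        have hdlen : ((p :: t).drop (1 + altChain mg p.2 t)).length ≤ N := by
          simp at hP ⊢; omega
        have := ih _ hdlen hdne r' hr'
        simp [shiftRun]
        omega

lemma slice_shift (P : List (Int × Int)) (k : Nat) (a b : Int) (ha : 0 ≤ a) (hb : 0 ≤ b) :
    PySem.List.slice P (some (a + k)) (some (b + k)) = PySem.List.slice (P.drop k) (some a) (some b) := by
  rw [PySem.List.slice_toNat _ (by omega) (by omega), PySem.List.slice_toNat _ ha hb]
  rw [List.drop_drop]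
  congr 1
  · omega
  · congr 1; omega

lemma slice_zero_take (xs : List (Int × Int)) (j : Nat) :
    PySem.List.slice xs (some 0) (some (j : Int)) = xs.take j := by
  rw [show (0 : Int) = ((0 : Nat) : Int) from rfl, PySem.List.slice_natCast]
  simp

lemma runsA_splitRuns (mg : Int) : ∀ (N : Nat) (P : List (Int × Int)), P.length ≤ N → P ≠ [] →
    (runsA mg P).map (fun r => PySem.List.slice P (some r.1) (some r.2)) = splitRuns mg P
    ∧ (runsA mg P).map (fun r => r.2 - r.1) = (splitRuns mg P).map (fun R => (R.length : Int)) := by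
  intro N
  induction N with
  | zero => intro P hP hne; simp [List.length_eq_zero_iff.mp (Nat.le_zero.mp hP)] at hne
  | succ N ih =>
    intro P hP hne
    obtain ⟨p, t, rfl⟩ := List.exists_cons_of_ne_nil hne
    rw [show splitRuns mg (p :: t)
        = (p :: t).take (1 + altChain mg p.2 t) :: splitRuns mg ((p :: t).drop (1 + altChain mg p.2 t)) from by
      rw [splitRuns]]
    by_cases hc : altChain mg p.2 t = t.length
    · have hdrop : (p :: t).drop (1 + altChain mg p.2 t) = [] := by
        apply List.drop_eq_nil_of_le; simp [hc]
      have htake : (p :: t).take (1 + altChain mg p.2 t) = p :: t := by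
        apply List.take_of_length_le; simp [hc]
      rw [runsA_nil_cut mg p t hc, hdrop, htake]
      rw [show splitRuns mg ([] : List (Int × Int)) = [] from by rw [splitRuns]]
      constructor
      · simp only [List.map_cons, List.map_nil]
        rw [slice_zero_take]
        simp
      · simp
    · have hc' : altChain mg p.2 t < t.length :=
        lt_of_le_of_ne (altChain_le mg p.2 t) hc
      set c := altChain mg p.2 t with hcdef
      have hdne : (p :: t).drop (1 + c) ≠ [] := by simp; omega
      have hdlen : ((p :: t).drop (1 + c)).length ≤ N := by simp at hP ⊢; omega
      obtain ⟨ihm, ihs⟩ := ih _ hdlen hdne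
      rw [runsA_cut mg p t hc']
      constructor
      · simp only [List.map_cons, List.map_map]
        congr 1
        · rw [slice_zero_take]
        · rw [← ihm]
          apply List.map_congr_left
          intro r hr
          have hnn := runsA_nonneg mg _ _ hdlen hdne r hr
          simp only [Function.comp_apply, shiftRun]
          exact slice_shift (p :: t) (1 + c) r.1 r.2 hnn.1 hnn.2
      · simp only [List.map_cons, List.map_map]
        congr 1
        · simp
          omega
        · rw [← ihm, List.map_map]
          have ihs' := ihs
          rw [← ihm, List.map_map] at ihs'
          have hpt := List.map_inj_left.mp ihs'
          apply List.map_congr_left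
          intro r hr
          have hp := hpt r hr
          simp only [Function.comp_apply, shiftRun] at hp ⊢
          omega

lemma altLoop_eq_fold (mg : Int) : ∀ (N : Nat) (P : List (Int × Int)), P.length ≤ N → ∀ best,
    altLoop mg best P = (splitRuns mg P).foldl (fun b R => if R.length > b.length then R else b) best := by
  intro N
  induction N with
  | zero =>
    intro P hP best
    rw [List.length_eq_zero_iff.mp (Nat.le_zero.mp hP)]
    rw [altLoop, show splitRuns mg ([] : List (Int × Int)) = [] from by rw [splitRuns]]
    rfl
  | succ N ih =>
    intro P hP best
    match P with
    | [] =>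
      rw [altLoop, show splitRuns mg ([] : List (Int × Int)) = [] from by rw [splitRuns]]
      rfl
    | p :: t =>
      rw [altLoop, show splitRuns mg (p :: t)
          = (p :: t).take (1 + altChain mg p.2 t) :: splitRuns mg ((p :: t).drop (1 + altChain mg p.2 t)) from by
        rw [splitRuns]]
      rw [List.foldl_cons]
      exact ih _ (by simp at hP ⊢; omega) _

def bestOf (b : Int × Int) (rs : List (Int × Int)) : Int × Int :=
  rs.foldl (fun b r => if r.2 - r.1 > b.2 - b.1 then r else b) b

lemma fold_fw_nil_cons (R : List (Int × Int)) (Rs : List (List (Int × Int))) (h : R ≠ []) :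
    (R :: Rs).foldl (fun acc R => if R.length > acc.length then R else acc) ([] : List (Int × Int))
      = Rs.foldl (fun acc R => if R.length > acc.length then R else acc) R := by
  rw [List.foldl_cons]
  congr 1
  simp [List.length_pos_iff.mpr h]

lemma bestOf_cons (b r : Int × Int) (rs : List (Int × Int)) :
    bestOf b (r :: rs) = bestOf (if r.2 - r.1 > b.2 - b.1 then r else b) rs := rfl

lemma bestCorr (P : List (Int × Int)) :
    ∀ (rs : List (Int × Int)) (Rs : List (List (Int × Int))) (b : Int × Int) (B : List (Int × Int)),
    rs.map (fun r => PySem.List.slice P (some r.1) (some r.2)) = Rs →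
    rs.map (fun r => r.2 - r.1) = Rs.map (fun R => (R.length : Int)) →
    PySem.List.slice P (some b.1) (some b.2) = B →
    b.2 - b.1 = (B.length : Int) →
    PySem.List.slice P (some (bestOf b rs).1) (some (bestOf b rs).2)
      = Rs.foldl (fun acc R => if R.length > acc.length then R else acc) B := by
  intro rs
  induction rs with
  | nil =>
    intro Rs b B h1 h2 hb hsb
    rw [← h1]
    simpa [bestOf] using hb
  | cons r rs ih =>
    intro Rs b B h1 h2 hb hsb
    match Rs with
    | [] => simp at h1
    | R :: Rs =>
      simp only [List.map_cons, List.cons.injEq] at h1 h2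
      rw [bestOf_cons, List.foldl_cons]
      have hcond : (r.2 - r.1 > b.2 - b.1) ↔ (R.length > B.length) := by
        rw [h2.1, hsb, ← h1.1]
        exact_mod_cast Iff.rfl
      by_cases hgt : r.2 - r.1 > b.2 - b.1
      · rw [if_pos hgt, if_pos (hcond.mp hgt)]
        exact ih Rs r R h1.2 h2.2 h1.1 h2.1
      · rw [if_neg hgt, if_neg (fun hx => hgt (hcond.mpr hx))]
        exact ih Rs b B h1.2 h2.2 hb hsb



lemma max?_cons_eq (rs : List (Int × Int)) :
    ∀ r, PySem.List.max? (r :: rs) (fun p => p.2 - p.1) = some (bestOf r rs) := by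
  induction rs with
  | nil => intro r; simp [PySem.List.max?, bestOf]
  | cons x rs ih =>
    intro r
    have h1 : PySem.List.max? (r :: x :: rs) (fun p => p.2 - p.1)
        = PySem.List.max? ((if x.2 - x.1 > r.2 - r.1 then x else r) :: rs) (fun p => p.2 - p.1) := by
      simp only [PySem.List.max?, List.foldl_cons, gt_iff_lt]
      split <;> rfl
    rw [h1, ih]
    simp only [bestOf, List.foldl_cons]

theorem main_eq (points : List (Int × Int)) (max_gap : Int) :
    keep_longest_run_py points max_gap = keep_longest_run_py_alt points max_gap := by
  by_cases hlen : points.length ≤ 2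
  · unfold keep_longest_run_py keep_longest_run_py_alt
    rw [if_pos hlen, if_pos hlen]
  · have hne : points ≠ [] := by
      intro h; rw [h] at hlen; simp at hlen
    obtain ⟨p, t, rfl⟩ := List.exists_cons_of_ne_nil hne
    have hA : keep_longest_run_py (p :: t) max_gap
        = PySem.List.slice (p :: t)
            (some (((PySem.List.max? (runsA max_gap (p :: t)) (fun r => r.2 - r.1)).getD (0, 0)).1))
            (some (((PySem.List.max? (runsA max_gap (p :: t)) (fun r => r.2 - r.1)).getD (0, 0)).2)) := by
      unfold keep_longest_run_py runsA
      rw [if_neg hlen]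
    have hB : keep_longest_run_py_alt (p :: t) max_gap
        = (splitRuns max_gap (p :: t)).foldl (fun b R => if R.length > b.length then R else b) [] := by
      unfold keep_longest_run_py_alt
      rw [if_neg hlen]
      exact altLoop_eq_fold max_gap (p :: t).length (p :: t) le_rfl []
    obtain ⟨r0, rs', hruns⟩ : ∃ r0 rs', runsA max_gap (p :: t) = r0 :: rs' := by
      by_cases hc : altChain max_gap p.2 t = t.length
      · exact ⟨_, _, runsA_nil_cut max_gap p t hc⟩
      · exact ⟨_, _, runsA_cut max_gap p t (lt_of_le_of_ne (altChain_le max_gap p.2 t) hc)⟩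
    obtain ⟨hm, hs⟩ := runsA_splitRuns max_gap (p :: t).length (p :: t) le_rfl hne
    rw [hruns] at hm hs
    simp only [List.map_cons] at hm hs
    rw [← hm, List.map_cons, List.cons.injEq] at hs
    have hsp : splitRuns max_gap (p :: t)
        = (p :: t).take (1 + altChain max_gap p.2 t) :: splitRuns max_gap ((p :: t).drop (1 + altChain max_gap p.2 t)) := by
      rw [splitRuns]
    have hr0ne : PySem.List.slice (p :: t) (some r0.1) (some r0.2) ≠ [] := by
      have := hm.trans hsp
      rw [List.cons.injEq] at this
      rw [this.1]
      intro hcon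
      have hlc := congrArg List.length hcon
      simp [List.length_take] at hlc
    rw [hA, hruns, max?_cons_eq rs' r0, Option.getD_some]
    rw [bestCorr (p :: t) rs' (rs'.map (fun r => PySem.List.slice (p :: t) (some r.1) (some r.2))) r0
        (PySem.List.slice (p :: t) (some r0.1) (some r0.2)) rfl hs.2 rfl hs.1]
    rw [hB, ← hm, fold_fw_nil_cons _ _ hr0ne]

-- ===== VERDICT (by name: the statement is the Claim_ definition above) =====
theorem keep_longest_run_py_spec : Claim_equal_keep_longest_run_py := by
  intro points max_gap _
  unfold Spec_keep_longest_run_py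
  exact main_eq points max_gap
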